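-- pv_equiv track=rewrite | github.com/mattladewig/clipper | clipper.py | validate_srt_content
-- ===== SOURCE A (Python) =====
-- def validate_srt_content(srt_content):
--     """
--     Validates the format of the SRT content.
--     Args:
--         srt_content (str): The SRT content to validate.
--     Returns:
--         bool: True if the SRT content is valid, False otherwise.
--     """
--     lines = srt_content.splitlines()
--     for i, line in enumerate(lines):
--         if i % 4 == 0:  # Sequence number
--             if not line.isdigit():
--                 return False
--         elif i % 4 == 1:  # Timestamp
--             if not ("-->" in line and len(line.split("-->")) == 2):
--                 return False
--         # Other lines can be empty or contain text
--     return True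
-- ===== SOURCE B (Python) =====
-- def validate_srt_content(srt_content):
--     """Chunk-based validation: consume the lines four at a time; the first
--     line of each chunk must be a sequence number, the second (if present)
--     a timestamp line; no per-index counter is kept."""
--     lines = srt_content.splitlines()
--     while lines:
--         chunk, lines = lines[:4], lines[4:]
--         if not chunk[0].isdigit():
--             return False
--         if len(chunk) > 1 and not ("-->" in chunk[1] and len(chunk[1].split("-->")) == 2):
--             return False
--     return True
-- ===== Notes on version B (the rewrite author's own statement) =====
-- stated objective: alternative
-- what changed: Replaced the enumerate/mod-4 single loop with early returns by a while loop that slices the line list into 4-line chunks and validates each chunk's first and second line directly, keeping no index counter.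
import Mathlib
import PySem

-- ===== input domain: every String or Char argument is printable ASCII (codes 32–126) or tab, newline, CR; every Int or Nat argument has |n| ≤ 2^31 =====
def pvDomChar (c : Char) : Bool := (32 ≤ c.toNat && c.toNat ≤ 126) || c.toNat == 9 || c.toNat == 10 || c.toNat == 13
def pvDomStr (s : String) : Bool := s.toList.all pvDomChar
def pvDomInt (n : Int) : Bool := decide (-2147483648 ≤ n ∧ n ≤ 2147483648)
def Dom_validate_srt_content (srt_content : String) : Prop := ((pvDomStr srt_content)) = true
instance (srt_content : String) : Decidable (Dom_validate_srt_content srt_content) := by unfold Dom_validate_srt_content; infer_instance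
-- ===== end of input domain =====

-- B changes the decomposition: a chunk-of-4 while loop instead of A's enumerate/mod-4 counter loop (objective: alternative).

-- ===== PORT A =====
-- the timestamp-line test both Pythons contain verbatim: '"-->" in line and len(line.split("-->")) == 2'
def pvTsOk (line : String) : Bool :=
  PySem.Str.isIn "-->" line && ((PySem.Str.split? line "-->").getD []).length == 2

-- A's 'for i, line in enumerate(lines)' loop with early returns
def pvGoA (i : Nat) (lines : List String) : Bool :=
  match lines with
  | [] => true
  | line :: rest =>
    if i % 4 == 0 then
      if !PySem.Str.strIsdigit line then false else pvGoA (i + 1) rest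
    else if i % 4 == 1 then
      if !pvTsOk line then false else pvGoA (i + 1) rest
    else pvGoA (i + 1) rest

def validate_srt_content (srt_content : String) : Bool :=
  pvGoA 0 (PySem.Str.splitlines srt_content)

-- ===== PORT B =====
-- B's 'while lines: chunk, lines = lines[:4], lines[4:]' loop
def pvGoB (lines : List String) : Bool :=
  match lines with
  | [] => true
  | l :: rest0 =>
    let chunk := PySem.List.slice (l :: rest0) none (some 4)
    let rest := PySem.List.slice (l :: rest0) (some 4) none
    if !PySem.Str.strIsdigit ((PySem.List.pyGet? chunk 0).getD "") then false
    else if decide (1 < chunk.length) && !pvTsOk ((PySem.List.pyGet? chunk 1).getD "") then false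
    else pvGoB rest
termination_by lines.length
decreasing_by
  rw [PySem.List.slice_from _ (by norm_num)]
  simp

def validate_srt_content_alt (srt_content : String) : Bool :=
  pvGoB (PySem.Str.splitlines srt_content)

-- ===== PRECONDITION & SPEC =====
def Spec_validate_srt_content (srt_content : String) (out : Bool) : Prop := out = validate_srt_content_alt srt_content
instance (srt_content : String) (out : Bool) : Decidable (Spec_validate_srt_content srt_content out) := by unfold Spec_validate_srt_content; infer_instance

-- ===== CLAIM (what is proved, stated in full; the proofs are below) =====
def Claim_equal_validate_srt_content : Prop := ∀ (srt_content : String), Dom_validate_srt_content srt_content → Spec_validate_srt_content srt_content (validate_srt_content srt_content)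

-- ===== LEMMAS AND PROOFS =====

lemma pvGoB_nil : pvGoB [] = true := by unfold pvGoB; rfl

lemma pvGoA_goB : ∀ (xs : List String) (n : Nat), pvGoA (4 * n) xs = pvGoB xs
  | [], n => by unfold pvGoB; simp [pvGoA]
  | [a], n => by
    unfold pvGoB
    simp [pvGoA, PySem.List.slice_to _ (by norm_num : (0:Int) ≤ 4), PySem.List.slice_from _ (by norm_num : (0:Int) ≤ 4), PySem.List.pyGet?, PySem.List.pyIdx?, Nat.mul_mod_right, pvGoB_nil]
  | [a, b], n => by
    have h1 : (4 * n + 1) % 4 = 1 := by omega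
    unfold pvGoB
    simp [pvGoA, pvTsOk, PySem.List.slice_to _ (by norm_num : (0:Int) ≤ 4), PySem.List.slice_from _ (by norm_num : (0:Int) ≤ 4), PySem.List.pyGet?, PySem.List.pyIdx?,
      Nat.mul_mod_right, h1, pvGoB_nil]
  | [a, b, c], n => by
    have h1 : (4 * n + 1) % 4 = 1 := by omega
    have h2 : (4 * n + 2) % 4 = 2 := by omega
    unfold pvGoB
    simp [pvGoA, pvTsOk, PySem.List.slice_to _ (by norm_num : (0:Int) ≤ 4), PySem.List.slice_from _ (by norm_num : (0:Int) ≤ 4), PySem.List.pyGet?, PySem.List.pyIdx?,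
      Nat.mul_mod_right, h1, h2, pvGoB_nil]
  | a :: b :: c :: d :: rest, n => by
    have h1 : (4 * n + 1) % 4 = 1 := by omega
    have h2 : (4 * n + 2) % 4 = 2 := by omega
    have h3 : (4 * n + 3) % 4 = 3 := by omega
    have h4 : 4 * n + 3 + 1 = 4 * (n + 1) := by omega
    have ih := pvGoA_goB rest (n + 1)
    unfold pvGoB
    simp [pvGoA, pvTsOk, PySem.List.slice_to _ (by norm_num : (0:Int) ≤ 4), PySem.List.slice_from _ (by norm_num : (0:Int) ≤ 4), PySem.List.pyGet?, PySem.List.pyIdx?,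
      Nat.mul_mod_right, h1, h2, h3, h4, ih]

-- ===== VERDICT (by name: the statement is the Claim_ definition above) =====
theorem validate_srt_content_spec : Claim_equal_validate_srt_content := by
  intro s _
  unfold Spec_validate_srt_content validate_srt_content validate_srt_content_alt
  simpa using pvGoA_goB (PySem.Str.splitlines s) 0
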